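-- pv_equiv track=rewrite | github.com/MikeWorth/Profanagrammer | profanagrammer.py | find_unused_letters
-- ===== SOURCE A (Python) =====
-- def find_unused_letters(letters,words):
--     letter_count_in_dictionary={}
--     for letter in letters:
--         letter_count_in_dictionary[letter]=0
--
--     for word in words:
--         for letter in word:
--             if letter in letters:
--                 letter_count_in_dictionary[letter]+=1
--
--     unused_letters=[]
--     for letter in letter_count_in_dictionary:
--         if letter_count_in_dictionary[letter]==0:
--             unused_letters.append(letter)
--
--     return unused_letters
-- ===== SOURCE B (Python) =====
-- def find_unused_letters(letters, words):
--     # Letter-driven search: for each unique target letter (first-appearance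
--     # order), probe every word for that letter; keep the letters no word contains.
--     return [c for c in dict.fromkeys(letters)
--             if all(c not in word for word in words)]
-- ===== Notes on version B (the rewrite author's own statement) =====
-- stated objective: faster
-- what changed: A is word-driven: it initialises a per-letter count dict, scans every character of every word incrementing counts under a 'letter in letters' membership guard, then collects the zero-count keys; B inverts the nesting and is letter-driven: it iterates the deduplicated target letters and for each one probes every word with a substring-absence test, with no counting and no dict.
import Mathlib
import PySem

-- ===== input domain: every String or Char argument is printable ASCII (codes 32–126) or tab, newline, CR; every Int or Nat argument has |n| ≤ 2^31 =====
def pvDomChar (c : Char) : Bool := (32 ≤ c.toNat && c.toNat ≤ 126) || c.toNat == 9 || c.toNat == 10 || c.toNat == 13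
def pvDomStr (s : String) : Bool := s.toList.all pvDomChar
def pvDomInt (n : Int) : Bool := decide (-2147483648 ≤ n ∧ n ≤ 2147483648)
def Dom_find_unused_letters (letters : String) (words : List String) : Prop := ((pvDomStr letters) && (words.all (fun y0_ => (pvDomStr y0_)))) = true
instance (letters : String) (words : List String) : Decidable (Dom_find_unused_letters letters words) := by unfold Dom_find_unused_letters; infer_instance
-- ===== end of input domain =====

-- B inverts A's loop nesting: instead of A's word-driven counting (per-letter count dict,
-- incremented while scanning every word character), B is letter-driven — it iterates the
-- deduplicated target letters and probes each word for absence; same return value everywhere.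

-- ===== PORT A =====
-- 'letter in letters' on a one-character string is exactly char membership in letters.
def find_unused_letters (letters : String) (words : List String) : List String :=
  let d0 : PySem.Dict Char Int :=
    letters.toList.foldl (fun d c => d.insert c 0) PySem.Dict.empty
  let d1 : PySem.Dict Char Int :=
    words.foldl (fun d w =>
      w.toList.foldl (fun d c =>
        if letters.toList.contains c then d.modify c 0 (· + 1) else d) d) d0
  -- 'for letter in dict' iterates the keys; the lookup key is always present (it came from d1's keys)
  d1.keys.foldl (fun acc c =>
    if d1.getD c 0 == 0 then acc ++ [String.singleton c] else acc) []

-- ===== PORT B =====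
-- dict.fromkeys → dedup (first-appearance order); 'c not in word' → char absence in the word.
def find_unused_letters_alt (letters : String) (words : List String) : List String :=
  ((PySem.List.dedup letters.toList).filter
      (fun c => words.all (fun w => !(w.toList.contains c)))).map
    (fun c => String.singleton c)

-- ===== PRECONDITION & SPEC =====
def Spec_find_unused_letters (letters : String) (words : List String) (out : List String) : Prop := out = find_unused_letters_alt letters words
instance (letters : String) (words : List String) (out : List String) : Decidable (Spec_find_unused_letters letters words out) := by unfold Spec_find_unused_letters; infer_instance

-- ===== CLAIM (what is proved, stated in full; the proofs are below) =====
def Claim_equal_find_unused_letters : Prop := ∀ (letters : String) (words : List String), Dom_find_unused_letters letters words → Spec_find_unused_letters letters words (find_unused_letters letters words)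

-- ===== LEMMAS AND PROOFS =====

-- A's initial dict: every letter is a key with value 0
theorem getD_foldl_insert_zero (l : List Char) (d : PySem.Dict Char Int) (c : Char) :
    (l.foldl (fun d c => d.insert c (0 : Int)) d).getD c 0 = if c ∈ l then 0 else d.getD c 0 := by
  induction l generalizing d with
  | nil => simp
  | cons x xs ih =>
    simp only [List.foldl_cons, ih, List.mem_cons]
    by_cases hc : c ∈ xs
    · simp [hc]
    · by_cases hx : c = x <;> simp [hc, hx, PySem.Dict.getD_insert]

theorem find_unused_letters_spec : Claim_equal_find_unused_letters := by
  intro letters words _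
  unfold Spec_find_unused_letters find_unused_letters find_unused_letters_alt
  simp only []
  set L : List Char := words.flatMap String.toList with hL
  -- collapse the nested word loop of A into one loop over all word characters
  have hflat : ∀ (d : PySem.Dict Char Int),
      words.foldl (fun d w =>
        w.toList.foldl (fun d c =>
          if letters.toList.contains c then d.modify c 0 (· + 1) else d) d) d
      = L.foldl (fun d c =>
          if letters.toList.contains c then d.modify c 0 (· + 1) else d) d := by
    intro d
    rw [hL, List.flatMap_def, List.foldl_flatten, List.foldl_map]
  rw [hflat]
  set d0 : PySem.Dict Char Int :=
    letters.toList.foldl (fun d c => d.insert c 0) PySem.Dict.empty with hd0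
  set F : List Char := L.filter (fun c => letters.toList.contains c) with hF
  set d1 : PySem.Dict Char Int := F.foldl (fun d c => d.modify c 0 (· + 1)) d0 with hd1
  have hdA : L.foldl (fun d c =>
      if letters.toList.contains c then d.modify c 0 (· + 1) else d) d0 = d1 := by
    rw [hd1, hF]; exact PySem.List.foldl_if_eq_foldl_filter _ _ _ _
  rw [hdA]
  -- the keys of A's dict are the deduplicated letters
  have hkeys0 : d0.keys = PySem.List.dedup letters.toList := by
    rw [hd0, PySem.Dict.keys_foldl_insert, PySem.Dict.keys_empty]
    simp [PySem.Set.update_nil_left]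
  have hmemF : ∀ c ∈ F, c ∈ d0.keys := by
    intro c hc
    rw [hkeys0]
    have := List.of_mem_filter hc
    simpa [PySem.List.dedup_eq_ofList, PySem.Set.mem_ofList] using this
  have hkeys1 : d1.keys = d0.keys := by
    rw [hd1, PySem.Dict.keys_foldl_modify, PySem.Set.update_eq_append_filter]
    have hnil : (PySem.Set.ofList F).filter (fun y => !(PySem.Set.contains d0.keys y)) = [] := by
      rw [List.filter_eq_nil_iff]
      intro a ha
      simp only [PySem.Set.mem_ofList] at ha
      simp [hmemF a ha]
    rw [hnil, List.append_nil]
  -- value of A's dict at a letter = its count among the word characters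
  have hval : ∀ c ∈ letters.toList, d1.getD c 0 = (F.count c : Int) := by
    intro c hc
    rw [hd1, PySem.Dict.getD_foldl_modify_add_one, hd0, getD_foldl_insert_zero]
    simp [hc]
  -- turn A's final append loop into a filter+map
  rw [PySem.List.foldl_append_if]
  rw [hkeys1, hkeys0]
  simp only [List.nil_append]
  congr 1
  apply List.filter_congr
  intro c hc
  have hcl : c ∈ letters.toList := by
    simpa [PySem.List.dedup_eq_ofList, PySem.Set.mem_ofList] using hc
  have hcount : d1.getD c 0 = (F.count c : Int) := hval c hcl
  have hFL : F.count c = L.count c := by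
    rw [hF, List.count_filter]
    simp [hcl]
  have hLmem : c ∈ L ↔ ∃ w ∈ words, c ∈ w.toList := by
    rw [hL]; simp [List.mem_flatMap]
  rw [hcount]
  by_cases h : ∃ w ∈ words, c ∈ w.toList
  · obtain ⟨w, hw, hcw⟩ := h
    have hne' : L.count c ≠ 0 := by
      rw [Nat.ne_zero_iff_zero_lt, List.count_pos_iff]
      exact hLmem.mpr ⟨w, hw, hcw⟩
    simp only [hFL]
    have h1 : ((L.count c : Int) == 0) = false := by
      simp [hne']
    have h2 : (words.all fun w => !w.toList.contains c) = false := by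
      rw [List.all_eq_false]
      exact ⟨w, hw, by simp [hcw]⟩
    rw [h1, h2]
  · have hz : L.count c = 0 := by
      rw [List.count_eq_zero]
      intro hmem
      exact h (hLmem.mp hmem)
    simp [hFL, hz, List.all_eq_true]
    intro w hw hcw
    exact h ⟨w, hw, hcw⟩
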